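-- pv_equiv track=rewrite | github.com/thetawavez/vaelweb | vael_core/nexus/suggest.py | _get_highest_severity
-- ===== SOURCE A (Python) =====
-- from typing import Dict, List, Any, Optional, Tuple
--
-- def _get_highest_severity(rules: List[Dict]) -> str:
--     """Get highest severity from a list of rules
--
--     Args:
--         rules: List of rules
--
--     Returns:
--         Highest severity
--     """
--     severity_order = {
--         "CRITICAL": 4,
--         "HIGH": 3,
--         "MEDIUM": 2,
--         "LOW": 1,
--         "INFO": 0
--     }
--
--     highest = "INFO"
--     highest_value = 0
--
--     for rule in rules:
--         severity = rule.get("severity", "INFO")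
--         value = severity_order.get(severity, 0)
--
--         if value > highest_value:
--             highest = severity
--             highest_value = value
--
--     return highest
-- ===== SOURCE B (Python) =====
-- def _get_highest_severity(rules):
--     """Get highest severity from a list of rules (set build + fixed priority scan)."""
--     present = {rule.get("severity", "INFO") for rule in rules}
--     for name in ("CRITICAL", "HIGH", "MEDIUM", "LOW"):
--         if name in present:
--             return name
--     return "INFO"
-- ===== Notes on version B (the rewrite author's own statement) =====
-- stated objective: idiomatic
-- what changed: Replaces the max-value-tracking scan over a numeric severity table by building the set of severities present once and returning the first hit in a fixed highest-to-lowest priority scan (CRITICAL, HIGH, MEDIUM, LOW, else INFO).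
import Mathlib
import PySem

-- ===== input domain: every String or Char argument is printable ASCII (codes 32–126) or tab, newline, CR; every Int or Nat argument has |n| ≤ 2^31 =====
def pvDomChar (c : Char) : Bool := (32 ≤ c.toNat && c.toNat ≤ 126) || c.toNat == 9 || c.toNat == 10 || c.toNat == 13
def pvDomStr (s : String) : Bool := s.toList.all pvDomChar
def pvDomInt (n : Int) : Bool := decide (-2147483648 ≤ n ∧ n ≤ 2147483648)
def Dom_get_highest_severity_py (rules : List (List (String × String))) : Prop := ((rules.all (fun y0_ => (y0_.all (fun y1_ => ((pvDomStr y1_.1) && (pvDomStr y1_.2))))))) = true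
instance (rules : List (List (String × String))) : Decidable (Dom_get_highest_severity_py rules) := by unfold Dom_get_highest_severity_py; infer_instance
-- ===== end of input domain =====

-- B rebuilds the result as a set of present severities plus a fixed highest-to-lowest
-- priority scan, instead of A's max-value-tracking fold over a numeric severity table.

-- ===== PORT A =====
-- the severity_order dict of A
def pvSevOrder : PySem.Dict String Int :=
  PySem.Dict.mk [("CRITICAL", 4), ("HIGH", 3), ("MEDIUM", 2), ("LOW", 1), ("INFO", 0)]

def get_highest_severity_py (rules : List (List (String × String))) : String :=
  (rules.foldl
    (fun (st : String × Int) rule =>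
      let severity := (PySem.Dict.mk rule).getD "severity" "INFO"
      let value := pvSevOrder.getD severity 0
      if value > st.2 then (severity, value) else st)
    ("INFO", 0)).1

-- ===== PORT B =====
def get_highest_severity_py_alt (rules : List (List (String × String))) : String :=
  let present : PySem.Set String :=
    PySem.Set.ofList (rules.map (fun rule => (PySem.Dict.mk rule).getD "severity" "INFO"))
  match ["CRITICAL", "HIGH", "MEDIUM", "LOW"].find? (fun name => PySem.Set.contains present name) with
  | some name => name
  | none => "INFO"

-- ===== PRECONDITION & SPEC =====
def Spec_get_highest_severity_py (rules : List (List (String × String))) (out : String) : Prop := out = get_highest_severity_py_alt rules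
instance (rules : List (List (String × String))) (out : String) : Decidable (Spec_get_highest_severity_py rules out) := by unfold Spec_get_highest_severity_py; infer_instance

-- ===== CLAIM (what is proved, stated in full; the proofs are below) =====
def Claim_equal_get_highest_severity_py : Prop := ∀ (rules : List (List (String × String))), Dom_get_highest_severity_py rules → Spec_get_highest_severity_py rules (get_highest_severity_py rules)

-- ===== LEMMAS AND PROOFS =====

/-- the severity a rule contributes -/
def pvSev (rule : List (String × String)) : String :=
  (PySem.Dict.mk rule).getD "severity" "INFO"

/-- plain-function form of `pvSevOrder.getD s 0` -/
def pvVal (s : String) : Int :=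
  if s = "CRITICAL" then 4 else if s = "HIGH" then 3 else
  if s = "MEDIUM" then 2 else if s = "LOW" then 1 else 0

/-- canonical name for each positive severity value -/
def pvCanon (v : Int) : String :=
  if v = 4 then "CRITICAL" else if v = 3 then "HIGH" else
  if v = 2 then "MEDIUM" else if v = 1 then "LOW" else "INFO"

/-- A's loop step, with the dict lookup replaced by its plain form -/
def pvStepA (st : String × Int) (rule : List (String × String)) : String × Int :=
  if pvVal (pvSev rule) > st.2 then (pvSev rule, pvVal (pvSev rule)) else st

/-- running maximum of severity values, starting at v -/
def pvMax (v : Int) (rules : List (List (String × String))) : Int :=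
  rules.foldl (fun m r => max m (pvVal (pvSev r))) v

theorem pvSevOrder_getD (s : String) : pvSevOrder.getD s 0 = pvVal s := by
  simp only [pvSevOrder, pvVal, PySem.Dict.getD_eq_get?_getD, PySem.Dict.get?_mk_cons,
    beq_iff_eq]
  rcases eq_or_ne s "CRITICAL" with h | h
  · subst h; decide
  rw [if_neg (Ne.symm h), if_neg h]
  rcases eq_or_ne s "HIGH" with h2 | h2
  · subst h2; decide
  rw [if_neg (Ne.symm h2), if_neg h2]
  rcases eq_or_ne s "MEDIUM" with h3 | h3
  · subst h3; decide
  rw [if_neg (Ne.symm h3), if_neg h3]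
  rcases eq_or_ne s "LOW" with h4 | h4
  · subst h4; decide
  rw [if_neg (Ne.symm h4), if_neg h4]
  rcases eq_or_ne s "INFO" with h5 | h5
  · subst h5; decide
  rw [if_neg (Ne.symm h5)]
  simp [PySem.Dict.get?]

theorem pvVal_bounds (s : String) : 0 ≤ pvVal s ∧ pvVal s ≤ 4 := by
  unfold pvVal; split_ifs <;> omega

theorem pvCanon_val (s : String) (h : 0 < pvVal s) : s = pvCanon (pvVal s) := by
  unfold pvVal at *
  split_ifs at h with h1 h2 h3 h4
  · subst h1; rfl
  · subst h2; rfl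
  · subst h3; rfl
  · subst h4; rfl
  · omega

theorem pvMax_lb (v : Int) (rules : List (List (String × String))) : v ≤ pvMax v rules := by
  induction rules generalizing v with
  | nil => simp [pvMax]
  | cons r rs ih =>
    have := ih (max v (pvVal (pvSev r)))
    simp only [pvMax, List.foldl_cons] at *
    omega

theorem pvMax_ub (v : Int) (rules : List (List (String × String))) (hv : v ≤ 4) :
    pvMax v rules ≤ 4 := by
  induction rules generalizing v with
  | nil => simpa [pvMax]
  | cons r rs ih =>
    simp only [pvMax, List.foldl_cons] at *
    exact ih _ (by have := (pvVal_bounds (pvSev r)).2; omega)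

theorem pvMax_mem_le (v : Int) (rules : List (List (String × String)))
    (r : List (String × String)) (hr : r ∈ rules) : pvVal (pvSev r) ≤ pvMax v rules := by
  induction rules generalizing v with
  | nil => exact absurd hr (List.not_mem_nil)
  | cons x xs ih =>
    simp only [pvMax, List.foldl_cons] at *
    rcases List.mem_cons.mp hr with h | h
    · subst h
      have := pvMax_lb (max v (pvVal (pvSev r))) xs
      simp only [pvMax] at this; omega
    · exact ih _ h

theorem pvMax_attained (v : Int) (rules : List (List (String × String)))
    (h : v < pvMax v rules) :
    ∃ r ∈ rules, pvVal (pvSev r) = pvMax v rules := by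
  induction rules generalizing v with
  | nil => exact absurd h (by simp [pvMax])
  | cons x xs ih =>
    simp only [pvMax, List.foldl_cons] at *
    by_cases hx : max v (pvVal (pvSev x)) < pvMax (max v (pvVal (pvSev x))) xs
    · obtain ⟨r, hr, hval⟩ := ih _ hx
      exact ⟨r, List.mem_cons_of_mem _ hr, hval⟩
    · have hlb := pvMax_lb (max v (pvVal (pvSev x))) xs
      simp only [pvMax] at hlb hx ⊢
      refine ⟨x, by simp, ?_⟩
      omega

/-- A's fold computes the canonical name of the running maximum. -/
theorem foldA_eq (rules : List (List (String × String))) (v : Int) (h0 : 0 ≤ v) (h4 : v ≤ 4) :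
    rules.foldl pvStepA (pvCanon v, v) = (pvCanon (pvMax v rules), pvMax v rules) := by
  induction rules generalizing v with
  | nil => simp [pvMax]
  | cons r rs ih =>
    rw [List.foldl_cons]
    by_cases hgt : pvVal (pvSev r) > v
    · have hb := pvVal_bounds (pvSev r)
      have hstep : pvStepA (pvCanon v, v) r = (pvCanon (pvVal (pvSev r)), pvVal (pvSev r)) := by
        rw [pvStepA, if_pos hgt, ← pvCanon_val _ (by omega)]
      rw [hstep, ih _ (by omega) (by omega)]
      have hmx : pvMax (pvVal (pvSev r)) rs = pvMax v (r :: rs) := by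
        simp only [pvMax, List.foldl_cons]
        rw [show max v (pvVal (pvSev r)) = pvVal (pvSev r) by omega]
      rw [hmx]
    · have hstep : pvStepA (pvCanon v, v) r = (pvCanon v, v) := by
        rw [pvStepA, if_neg hgt]
      rw [hstep, ih v h0 h4]
      have hmx : pvMax v rs = pvMax v (r :: rs) := by
        simp only [pvMax, List.foldl_cons]
        rw [show max v (pvVal (pvSev r)) = v by omega]
      rw [hmx]

theorem portA_eq (rules : List (List (String × String))) :
    get_highest_severity_py rules = pvCanon (pvMax 0 rules) := by
  have hfun : (fun (st : String × Int) rule =>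
      let severity := (PySem.Dict.mk rule).getD "severity" "INFO"
      let value := pvSevOrder.getD severity 0
      if value > st.2 then (severity, value) else st) = pvStepA := by
    funext st rule
    simp only [pvStepA, pvSev, pvSevOrder_getD]
  unfold get_highest_severity_py
  rw [hfun, show (("INFO", (0:Int)) : String × Int) = (pvCanon 0, 0) from rfl,
    foldA_eq rules 0 (by omega) (by omega)]

theorem mem_sevs_le (rules : List (List (String × String))) (s : String)
    (hs : s ∈ rules.map (fun rule => (PySem.Dict.mk rule).getD "severity" "INFO")) :
    pvVal s ≤ pvMax 0 rules := by
  obtain ⟨r, hr, hsr⟩ := List.mem_map.mp hs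
  subst hsr
  exact pvMax_mem_le 0 rules r hr

theorem canon_mem_sevs (rules : List (List (String × String))) (h : 0 < pvMax 0 rules) :
    pvCanon (pvMax 0 rules) ∈
      rules.map (fun rule => (PySem.Dict.mk rule).getD "severity" "INFO") := by
  obtain ⟨r, hr, hval⟩ := pvMax_attained 0 rules h
  have hcanon := pvCanon_val (pvSev r) (by omega)
  rw [hval] at hcanon
  exact List.mem_map.mpr ⟨r, hr, by rw [← hcanon]; rfl⟩

theorem portB_eq (rules : List (List (String × String))) :
    get_highest_severity_py_alt rules = pvCanon (pvMax 0 rules) := by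
  unfold get_highest_severity_py_alt
  set S := rules.map (fun rule => (PySem.Dict.mk rule).getD "severity" "INFO") with hS
  have hub := pvMax_ub 0 rules (by omega)
  have hlb := pvMax_lb 0 rules
  have hmemle := mem_sevs_le rules
  have hcm := canon_mem_sevs rules
  have hc : ∀ x : String,
      PySem.Set.contains (PySem.Set.ofList S) x = true ↔ x ∈ S := by
    intro x
    rw [PySem.Set.contains_iff, PySem.Set.mem_ofList]
  have hcfn : ∀ x : String, x ∉ S → ¬ PySem.Set.contains (PySem.Set.ofList S) x = true := by
    intro x hx hcx
    exact hx ((hc x).mp hcx)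
  show (match List.find? (fun name => PySem.Set.contains (PySem.Set.ofList S) name)
      ["CRITICAL", "HIGH", "MEDIUM", "LOW"] with
    | some name => name
    | none => "INFO") = pvCanon (pvMax 0 rules)
  set m := pvMax 0 rules with hm
  interval_cases m
  · -- m = 0 : none of the four names can be in S
    rw [show List.find? (fun name => PySem.Set.contains (PySem.Set.ofList S) name)
        ["CRITICAL", "HIGH", "MEDIUM", "LOW"] = none from by
      rw [List.find?_cons_of_neg (hcfn _ (fun h => absurd (hmemle _ h) (by decide))),
          List.find?_cons_of_neg (hcfn _ (fun h => absurd (hmemle _ h) (by decide))),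
          List.find?_cons_of_neg (hcfn _ (fun h => absurd (hmemle _ h) (by decide))),
          List.find?_cons_of_neg (hcfn _ (fun h => absurd (hmemle _ h) (by decide)))]
      rfl]
    decide
  · -- m = 1 : LOW present, higher names absent
    have h1 : "LOW" ∈ S := by
      have := hcm (by omega)
      rwa [show pvCanon 1 = "LOW" by decide] at this
    rw [show List.find? (fun name => PySem.Set.contains (PySem.Set.ofList S) name)
        ["CRITICAL", "HIGH", "MEDIUM", "LOW"] = some "LOW" from by
      rw [List.find?_cons_of_neg (hcfn _ (fun h => absurd (hmemle _ h) (by decide))),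
          List.find?_cons_of_neg (hcfn _ (fun h => absurd (hmemle _ h) (by decide))),
          List.find?_cons_of_neg (hcfn _ (fun h => absurd (hmemle _ h) (by decide)))]
      exact List.find?_cons_of_pos ((hc _).mpr h1)]
    decide
  · -- m = 2 : MEDIUM present, higher names absent
    have h2 : "MEDIUM" ∈ S := by
      have := hcm (by omega)
      rwa [show pvCanon 2 = "MEDIUM" by decide] at this
    rw [show List.find? (fun name => PySem.Set.contains (PySem.Set.ofList S) name)
        ["CRITICAL", "HIGH", "MEDIUM", "LOW"] = some "MEDIUM" from by
      rw [List.find?_cons_of_neg (hcfn _ (fun h => absurd (hmemle _ h) (by decide))),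
          List.find?_cons_of_neg (hcfn _ (fun h => absurd (hmemle _ h) (by decide)))]
      exact List.find?_cons_of_pos ((hc _).mpr h2)]
    decide
  · -- m = 3 : HIGH present, CRITICAL absent
    have h3 : "HIGH" ∈ S := by
      have := hcm (by omega)
      rwa [show pvCanon 3 = "HIGH" by decide] at this
    rw [show List.find? (fun name => PySem.Set.contains (PySem.Set.ofList S) name)
        ["CRITICAL", "HIGH", "MEDIUM", "LOW"] = some "HIGH" from by
      rw [List.find?_cons_of_neg (hcfn _ (fun h => absurd (hmemle _ h) (by decide)))]
      exact List.find?_cons_of_pos ((hc _).mpr h3)]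
    decide
  · -- m = 4 : CRITICAL present
    have h4 : "CRITICAL" ∈ S := by
      have := hcm (by omega)
      rwa [show pvCanon 4 = "CRITICAL" by decide] at this
    rw [show List.find? (fun name => PySem.Set.contains (PySem.Set.ofList S) name)
        ["CRITICAL", "HIGH", "MEDIUM", "LOW"] = some "CRITICAL" from
      List.find?_cons_of_pos ((hc _).mpr h4)]
    decide

-- ===== VERDICT (by name: the statement is the Claim_ definition above) =====
theorem get_highest_severity_py_spec : Claim_equal_get_highest_severity_py := by
  intro rules _
  unfold Spec_get_highest_severity_py
  rw [portA_eq, portB_eq]
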